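-- pv_equiv track=rewrite | github.com/askyellow/askyellow-staging | ask_handler.py | apply_faceted_filters
-- ===== SOURCE A (Python) =====
-- def apply_faceted_filters(products: list, filters: dict) -> list:
--     if not filters:
--         return products
--
--     results = products
--
--     for key, value in filters.items():
--         # max / min ranges
--         if key.endswith("_max"):
--             base = key.replace("_max", "")
--             results = [
--                 p for p in results
--                 if p.get("facets", {}).get(base) is not None
--                 and p["facets"][base] <= value
--             ]
--
--         elif key.endswith("_min"):
--             base = key.replace("_min", "")
--             results = [
--                 p for p in results
--                 if p.get("facets", {}).get(base) is not None
--                 and p["facets"][base] >= value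
--             ]
--
--         # exact match
--         else:
--             results = [
--                 p for p in results
--                 if p.get("facets", {}).get(key) == value
--             ]
--
--     return results
-- ===== SOURCE B (Python) =====
-- def _matches(p, key, value):
--     facets = p.get("facets", {})
--     if key.endswith("_max"):
--         v = facets.get(key.replace("_max", ""))
--         return v is not None and v <= value
--     if key.endswith("_min"):
--         v = facets.get(key.replace("_min", ""))
--         return v is not None and v >= value
--     return facets.get(key) == value
--
--
-- def apply_faceted_filters(products: list, filters: dict) -> list:
--     if not filters:
--         return products
--     return [p for p in products if all(_matches(p, k, v) for k, v in filters.items())]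
-- ===== Notes on version B (the rewrite author's own statement) =====
-- stated objective: simpler
-- what changed: A rebuilds the intermediate results list once per filter (outer loop over filters, inner comprehension over the surviving products); B makes a single pass over products and keeps a product iff one helper predicate holds for all filters, so no intermediate lists are built.
import Mathlib
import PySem

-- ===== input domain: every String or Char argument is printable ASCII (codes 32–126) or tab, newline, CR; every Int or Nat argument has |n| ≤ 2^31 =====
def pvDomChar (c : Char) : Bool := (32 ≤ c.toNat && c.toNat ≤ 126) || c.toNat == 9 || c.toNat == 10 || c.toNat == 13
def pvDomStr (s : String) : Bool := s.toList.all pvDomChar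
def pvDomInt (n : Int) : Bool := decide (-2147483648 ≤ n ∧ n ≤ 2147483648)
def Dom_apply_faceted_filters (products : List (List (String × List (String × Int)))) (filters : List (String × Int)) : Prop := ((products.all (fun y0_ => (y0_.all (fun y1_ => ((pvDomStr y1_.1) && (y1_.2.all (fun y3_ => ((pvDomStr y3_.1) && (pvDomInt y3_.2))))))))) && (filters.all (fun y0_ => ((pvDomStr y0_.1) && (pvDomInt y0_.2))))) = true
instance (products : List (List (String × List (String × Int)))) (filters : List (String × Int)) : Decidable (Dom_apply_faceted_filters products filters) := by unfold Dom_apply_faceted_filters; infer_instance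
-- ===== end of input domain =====

-- B does one pass over products, keeping a product iff a helper predicate holds for every
-- filter, instead of A's rebuilding of the results list once per filter; return value only.

-- ===== PORT A =====
-- p.get("facets", {}) : the (first-match) association-list lookup, default empty dict
def pvFacets (p : List (String × List (String × Int))) : PySem.Dict String Int :=
  PySem.Dict.mk (((PySem.Dict.mk p).get? "facets").getD [])

-- the body of A's 'for key, value in filters.items()' loop
def pvStepA (results : List (List (String × List (String × Int)))) (kv : String × Int) :
    List (List (String × List (String × Int))) :=
  if PySem.Str.endswith kv.1 "_max" then
    let base := PySem.Str.replace kv.1 "_max" ""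
    results.filter (fun p =>
      match (pvFacets p).get? base with
      | none => false
      | some v => decide (v ≤ kv.2))
  else if PySem.Str.endswith kv.1 "_min" then
    let base := PySem.Str.replace kv.1 "_min" ""
    results.filter (fun p =>
      match (pvFacets p).get? base with
      | none => false
      | some v => decide (v ≥ kv.2))
  else
    results.filter (fun p => (pvFacets p).get? kv.1 == some kv.2)

def apply_faceted_filters (products : List (List (String × List (String × Int)))) (filters : List (String × Int)) : List (List (String × List (String × Int))) :=
  if filters = [] then products
  else filters.foldl pvStepA products

-- ===== PORT B =====
-- B's helper _matches(p, key, value)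
def pvMatches (p : List (String × List (String × Int))) (key : String) (value : Int) : Bool :=
  let facets := pvFacets p
  if PySem.Str.endswith key "_max" then
    match facets.get? (PySem.Str.replace key "_max" "") with
    | none => false
    | some v => decide (v ≤ value)
  else if PySem.Str.endswith key "_min" then
    match facets.get? (PySem.Str.replace key "_min" "") with
    | none => false
    | some v => decide (v ≥ value)
  else facets.get? key == some value

def apply_faceted_filters_alt (products : List (List (String × List (String × Int)))) (filters : List (String × Int)) : List (List (String × List (String × Int))) :=
  if filters = [] then products
  else products.filter (fun p => filters.all (fun kv => pvMatches p kv.1 kv.2))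

-- ===== PRECONDITION & SPEC =====
def Spec_apply_faceted_filters (products : List (List (String × List (String × Int)))) (filters : List (String × Int)) (out : List (List (String × List (String × Int)))) : Prop := out = apply_faceted_filters_alt products filters
instance (products : List (List (String × List (String × Int)))) (filters : List (String × Int)) (out : List (List (String × List (String × Int)))) : Decidable (Spec_apply_faceted_filters products filters out) := by unfold Spec_apply_faceted_filters; infer_instance

-- ===== CLAIM (what is proved, stated in full; the proofs are below) =====
def Claim_equal_apply_faceted_filters : Prop := ∀ (products : List (List (String × List (String × Int)))) (filters : List (String × Int)), Dom_apply_faceted_filters products filters → Spec_apply_faceted_filters products filters (apply_faceted_filters products filters)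

-- ===== LEMMAS AND PROOFS =====
theorem pvStepA_eq_filter (r : List (List (String × List (String × Int)))) (kv : String × Int) :
    pvStepA r kv = r.filter (fun p => pvMatches p kv.1 kv.2) := by
  simp only [pvStepA, pvMatches]
  split_ifs <;> rfl

theorem foldl_pvStepA_eq_filter_all (fs : List (String × Int))
    (ps : List (List (String × List (String × Int)))) :
    fs.foldl pvStepA ps = ps.filter (fun p => fs.all (fun kv => pvMatches p kv.1 kv.2)) := by
  induction fs generalizing ps with
  | nil => simp
  | cons kv fs ih =>
      rw [List.foldl_cons, pvStepA_eq_filter, ih, List.filter_filter]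
      exact List.filter_congr (fun p _ => by simp [Bool.and_comm])

-- ===== VERDICT (by name: the statement is the Claim_ definition above) =====
theorem apply_faceted_filters_spec : Claim_equal_apply_faceted_filters := by
  intro products filters _
  unfold Spec_apply_faceted_filters apply_faceted_filters apply_faceted_filters_alt
  by_cases hf : filters = [] <;> simp [hf, foldl_pvStepA_eq_filter_all]
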